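-- pv_equiv track=rewrite | github.com/justice-7/Algorithm | 프로그래머스/2/131704. 택배상자/택배상자.py | solution
-- ===== SOURCE A (Python) =====
-- from collections import deque
--
-- def solution(order):
--     a = deque(range(1, len(order)+1))
--     sub = []
--     answer = 0
--     ind = 0
--     while a or sub:
--         if a and a[0]==order[ind]:
--             ind+=1
--             answer+=1
--             a.popleft()
--         elif sub and sub[-1]==order[ind]:
--             ind+=1
--             answer+=1
--             sub.pop()
--         elif a:
--             sub.append(a.popleft())
--         else:
--             break
--     return answer
-- ===== SOURCE B (Python) =====
-- def solution(order):
--     # No deque and no explicit stack: the auxiliary stack of the simulation is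
--     # always the decreasing run of undelivered box numbers below the conveyor
--     # front, so it suffices to keep a delivered-set, the conveyor front `m`,
--     # and `top` = the largest undelivered number below m (0 if none).
--     n = len(order)
--     delivered = set()
--     m = 1       # smallest box number still on the conveyor belt
--     top = 0     # implicit stack top: largest undelivered number below m, or 0
--     answer = 0
--     for t in order:
--         if m <= t <= n:
--             # t is still on the belt: boxes m..t-1 go onto the implicit stack
--             if t > m:
--                 top = t - 1
--             m = t + 1
--         elif t != top or top == 0:
--             break
--         delivered.add(t)
--         answer += 1
--         while top > 0 and top in delivered:
--             top -= 1
--     return answer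
-- ===== Notes on version B (the rewrite author's own statement) =====
-- stated objective: faster
-- what changed: Replaces A's container simulation (a deque for the conveyor and an explicit auxiliary stack with push/pop events) by a stack-free formulation: a delivered-set, an integer conveyor front m, and a pointer `top` to the largest undelivered box below m, using the invariant that the simulation's stack is always the decreasing run of undelivered numbers below the conveyor front; a timing run measured B 7.45x faster at the largest size.
import Mathlib
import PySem

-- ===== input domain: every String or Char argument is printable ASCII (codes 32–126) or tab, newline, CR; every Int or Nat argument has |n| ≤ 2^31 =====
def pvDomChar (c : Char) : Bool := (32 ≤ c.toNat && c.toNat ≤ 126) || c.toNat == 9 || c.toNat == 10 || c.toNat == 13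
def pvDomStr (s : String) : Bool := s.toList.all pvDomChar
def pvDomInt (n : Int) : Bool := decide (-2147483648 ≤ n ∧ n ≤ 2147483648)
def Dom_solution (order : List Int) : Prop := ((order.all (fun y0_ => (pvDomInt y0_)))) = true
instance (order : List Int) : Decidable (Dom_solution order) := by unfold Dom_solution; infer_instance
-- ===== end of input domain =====

-- B drops A's container simulation entirely: instead of a conveyor deque and an explicit
-- auxiliary stack it keeps a delivered-set, the conveyor front m and a pointer `top` to the
-- largest undelivered number below m, using the invariant that the simulation's stack is
-- always the decreasing run of undelivered numbers below m (objective: faster — the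
-- timing run measured B 7.45x faster than A at the largest generated size).

-- ===== PORT A =====
-- A's while loop; `sub` is stored TOP-AT-HEAD (Python appends/pops at the end), so
-- sub[-1] is `head?` and append/pop are cons/tail.  `order[ind]` is ported with
-- pyGetD: in Python `ind` never leaves range while the loop body reads it (each
-- increment of ind removes one of the len(order) boxes), so the default is unreachable.
def solLoopA (order : List Int) (a sub : List Int) (answer ind : Int) : Int :=
  let t := PySem.List.pyGetD order ind 0
  match a with
  | x :: a' =>
    if x = t then solLoopA order a' sub (answer+1) (ind+1)
    else
      match sub with
      | s :: sub' =>
        if s = t then solLoopA order (x :: a') sub' (answer+1) (ind+1)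
        else solLoopA order a' (x :: s :: sub') answer ind
      | [] => solLoopA order a' [x] answer ind
  | [] =>
    match sub with
    | s :: sub' => if s = t then solLoopA order [] sub' (answer+1) (ind+1) else answer
    | [] => answer
termination_by 2 * a.length + sub.length
decreasing_by all_goals simp [List.length] <;> omega

def solution (order : List Int) : Int :=
  solLoopA order (PySem.List.pyRange 1 ((order.length : Int) + 1) 1) [] 0 0

-- ===== PORT B =====
-- B's inner `while top > 0 and top in delivered: top -= 1`.
def whileTop (delivered : PySem.Set Int) (top : Int) : Int :=
  if 0 < top ∧ top ∈ delivered then whileTop delivered (top - 1) else top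
termination_by top.toNat
decreasing_by omega

-- B's `for t in order` loop with state (m, delivered, top, answer); the shared
-- Python tail `delivered.add(t); answer += 1; while …` appears once per delivering branch.
def bLoop (n : Int) : List Int → Int → PySem.Set Int → Int → Int → Int
  | [], _, _, _, answer => answer
  | t :: rest, m, delivered, top, answer =>
    if m ≤ t ∧ t ≤ n then
      let top1 := if m < t then t - 1 else top
      let delivered' := PySem.Set.add delivered t
      bLoop n rest (t + 1) delivered' (whileTop delivered' top1) (answer + 1)
    else if t ≠ top ∨ top = 0 then answer
    else
      let delivered' := PySem.Set.add delivered t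
      bLoop n rest m delivered' (whileTop delivered' top) (answer + 1)

def solution_alt (order : List Int) : Int :=
  bLoop (order.length : Int) order 1 PySem.Set.empty 0 0

-- ===== PRECONDITION & SPEC =====
def Spec_solution (order : List Int) (out : Int) : Prop := out = solution_alt order
instance (order : List Int) (out : Int) : Decidable (Spec_solution order out) := by unfold Spec_solution; infer_instance

-- ===== CLAIM (what is proved, stated in full; the proofs are below) =====
def Claim_equal_solution : Prop := ∀ (order : List Int), Dom_solution order → Spec_solution order (solution order)

-- ===== LEMMAS AND PROOFS =====

-- one unfold of A's loop in head?/tail form (same computation, match eliminated)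
lemma solLoopA_cons (order : List Int) (x : Int) (a' sub : List Int) (answer ind : Int) :
    solLoopA order (x :: a') sub answer ind =
      (if x = PySem.List.pyGetD order ind 0 then solLoopA order a' sub (answer+1) (ind+1)
       else if sub.head? = some (PySem.List.pyGetD order ind 0) then
         solLoopA order (x :: a') sub.tail (answer+1) (ind+1)
       else solLoopA order a' (x :: sub) answer ind) := by
  cases sub with
  | nil => rw [solLoopA.eq_def]; simp
  | cons s sub' =>
    rw [solLoopA.eq_def]
    by_cases hx : x = PySem.List.pyGetD order ind 0 <;>
      by_cases hs : s = PySem.List.pyGetD order ind 0 <;> simp [hx, hs]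

lemma solLoopA_nil (order : List Int) (sub : List Int) (answer ind : Int) :
    solLoopA order [] sub answer ind =
      (if sub.head? = some (PySem.List.pyGetD order ind 0) then
         solLoopA order [] sub.tail (answer+1) (ind+1)
       else answer) := by
  cases sub with
  | nil => rw [solLoopA.eq_def]; simp
  | cons s sub' =>
    rw [solLoopA.eq_def]
    by_cases hs : s = PySem.List.pyGetD order ind 0 <;> simp [hs]

lemma getD_drop (order : List Int) (ind : Int) (t : Int) (rest : List Int)
    (h0 : 0 ≤ ind) (h : order.drop ind.toNat = t :: rest) :
    PySem.List.pyGetD order ind 0 = t := by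
  have hlt : ind.toNat < order.length := by
    by_contra h'
    rw [List.drop_eq_nil_iff.mpr (by omega)] at h
    simp at h
  rw [PySem.List.pyGetD_eq_getElem order 0 h0 (by omega)]
  have h2 : (order.drop ind.toNat)[0]'(by simp [h]) = t := by simp [h]
  simpa using h2

lemma drop_toNat_succ (order : List Int) (ind : Int) (t : Int) (rest : List Int)
    (h0 : 0 ≤ ind) (h : order.drop ind.toNat = t :: rest) :
    order.drop (ind + 1).toNat = rest := by
  have h1 : (ind + 1).toNat = ind.toNat + 1 := by omega
  rw [h1, ← List.drop_drop, h]
  simp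

-- A's run of push steps ending in a conveyor delivery of t (m ≤ t ≤ n):
-- boxes m..t-1 land on the stack (top at head), t is delivered.
lemma A_conv (order : List Int) (t ind : Int)
    (hget : PySem.List.pyGetD order ind 0 = t) :
    ∀ (k : ℕ) (m : Int) (sub : List Int) (ans : Int),
    (t - m).toNat ≤ k → m ≤ t → t ≤ (order.length : Int) →
    (∀ v ∈ sub, v < t) →
    solLoopA order (PySem.List.pyRange m ((order.length : Int) + 1) 1) sub ans ind
      = solLoopA order (PySem.List.pyRange (t+1) ((order.length : Int) + 1) 1)
          ((PySem.List.pyRange m t 1).reverse ++ sub) (ans+1) (ind+1) := by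
  intro k
  induction k with
  | zero =>
    intro m sub ans hk hmt htn hsub
    have hm : m = t := by omega
    subst hm
    rw [PySem.List.pyRange_one_cons (by omega), solLoopA_cons, hget,
      PySem.List.pyRange_one_eq_nil (le_refl m)]
    simp
  | succ k ih =>
    intro m sub ans hk hmt htn hsub
    by_cases hm : m = t
    · subst hm
      rw [PySem.List.pyRange_one_cons (by omega), solLoopA_cons, hget,
        PySem.List.pyRange_one_eq_nil (le_refl m)]
      simp
    · have hlt : m < t := by omega
      rw [PySem.List.pyRange_one_cons (show m < (order.length : Int) + 1 by omega),
        solLoopA_cons, hget]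
      rw [if_neg (by omega)]
      have hhd : sub.head? ≠ some t := by
        cases sub with
        | nil => simp
        | cons s sub' =>
          have := hsub s (by simp)
          simp; omega
      rw [if_neg hhd]
      rw [ih (m+1) (m :: sub) ans (by omega) (by omega) htn
        (by
          intro v hv
          rcases List.mem_cons.mp hv with h | h
          · omega
          · exact hsub v h)]
      rw [show PySem.List.pyRange m t 1 = m :: PySem.List.pyRange (m+1) t 1 from
        PySem.List.pyRange_one_cons hlt]
      simp

-- A pushes the whole remaining conveyor and stops, when t is neither on the
-- conveyor (t < m or t > n) nor the stack top.
lemma A_stuck (order : List Int) (t ind ans : Int)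
    (hget : PySem.List.pyGetD order ind 0 = t) :
    ∀ (k : ℕ) (m : Int) (sub : List Int),
    (((order.length : Int) + 1) - m).toNat ≤ k →
    (t < m ∨ (order.length : Int) < t) →
    sub.head? ≠ some t →
    solLoopA order (PySem.List.pyRange m ((order.length : Int) + 1) 1) sub ans ind = ans := by
  intro k
  induction k with
  | zero =>
    intro m sub hk hrange hhd
    rw [PySem.List.pyRange_one_eq_nil (by omega), solLoopA_nil, hget, if_neg hhd]
  | succ k ih =>
    intro m sub hk hrange hhd
    by_cases hm : (order.length : Int) + 1 ≤ m
    · rw [PySem.List.pyRange_one_eq_nil hm, solLoopA_nil, hget, if_neg hhd]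
    · rw [PySem.List.pyRange_one_cons (by omega), solLoopA_cons, hget,
        if_neg (by omega), if_neg hhd]
      exact ih (m+1) (m :: sub) (by omega) (by omega) (by simp; omega)

-- B's decrement loop reaches h when everything strictly between h and start is
-- delivered and h itself is 0 or undelivered.
lemma whileTop_eq (d : PySem.Set Int) :
    ∀ (k : ℕ) (start h : Int), (start - h).toNat ≤ k →
    0 ≤ h → h ≤ start →
    (∀ v, h < v → v ≤ start → v ∈ d) →
    (h = 0 ∨ h ∉ d) →
    whileTop d start = h := by
  intro k
  induction k with
  | zero =>
    intro start h hk h0 hhs _ hstop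
    have : start = h := by omega
    subst this
    rw [whileTop]
    rcases hstop with h1 | h1
    · simp [h1]
    · simp [h1]
  | succ k ih =>
    intro start h hk h0 hhs hbetween hstop
    by_cases heq : start = h
    · subst heq
      rw [whileTop]
      rcases hstop with h1 | h1
      · simp [h1]
      · simp [h1]
    · have hlt : h < start := by omega
      rw [whileTop, if_pos ⟨by omega, hbetween start hlt (le_refl _)⟩]
      exact ih (start - 1) h (by omega) h0 (by omega)
        (fun v hv1 hv2 => hbetween v hv1 (by omega)) hstop

-- main simulation lemma: A's stack `sub` is exactly the decreasing list of
-- undelivered numbers below m, and B's `top` is its head (0 if empty).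
lemma loop_eq (order : List Int) :
    ∀ (rest : List Int) (m : Int) (delivered : PySem.Set Int) (top : Int)
      (sub : List Int) (answer ind : Int),
    0 ≤ ind →
    rest = order.drop ind.toNat →
    1 ≤ m → m ≤ (order.length : Int) + 1 →
    ind + sub.length + ((order.length : Int) + 1 - m) = (order.length : Int) →
    (∀ v : Int, v ∈ sub ↔ 1 ≤ v ∧ v < m ∧ v ∉ delivered) →
    List.Pairwise (fun a b => b < a) sub →
    top = (sub.head?).getD 0 →
    (∀ v ∈ delivered, 1 ≤ v ∧ v < m) →
    solLoopA order (PySem.List.pyRange m ((order.length : Int) + 1) 1) sub answer ind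
      = bLoop (order.length : Int) rest m delivered top answer := by
  intro rest
  induction rest with
  | nil =>
    intro m delivered top sub answer ind h0 hdrop h1 h2 hcount hmem hpw htop hdel
    have hlen : order.length ≤ ind.toNat := by
      by_contra h'
      have := List.drop_eq_nil_iff.mp hdrop.symm
      omega
    have hm : m = (order.length : Int) + 1 := by omega
    have hst : sub = [] := by
      have : sub.length = 0 := by omega
      exact List.length_eq_zero_iff.mp this
    subst hm hst
    rw [PySem.List.pyRange_one_eq_nil (le_refl _), solLoopA_nil]
    simp [bLoop]
  | cons t rest' IH =>
    intro m delivered top sub answer ind h0 hdrop h1 h2 hcount hmem hpw htop hdel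
    have hget := getD_drop order ind t rest' h0 hdrop.symm
    have hdrop' := drop_toNat_succ order ind t rest' h0 hdrop.symm
    by_cases hc1 : m ≤ t ∧ t ≤ (order.length : Int)
    · -- conveyor delivery
      rw [A_conv order t ind hget (t - m).toNat m sub answer (le_refl _) hc1.1 hc1.2
        (by intro v hv; have := (hmem v).mp hv; omega)]
      have hlenr : (PySem.List.pyRange m t 1).length = (t - m).toNat :=
        PySem.List.length_pyRange_one m t
      have hsub' : ∀ v : Int, v ∈ (PySem.List.pyRange m t 1).reverse ++ sub ↔
          1 ≤ v ∧ v < t + 1 ∧ v ∉ PySem.Set.add delivered t := by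
        intro v
        rw [List.mem_append, List.mem_reverse, PySem.List.mem_pyRange_one, hmem v,
          PySem.Set.mem_add]
        constructor
        · rintro (⟨hv1, hv2⟩ | ⟨hv1, hv2, hv3⟩)
          · refine ⟨by omega, by omega, ?_⟩
            rintro (hvd | hvd)
            · exact absurd (hdel v hvd).2 (by omega)
            · omega
          · refine ⟨hv1, by omega, ?_⟩
            rintro (hvd | hvd)
            · exact hv3 hvd
            · omega
        · rintro ⟨hv1, hv2, hv3⟩
          by_cases hvm : v < m
          · exact Or.inr ⟨hv1, hvm, fun hvd => hv3 (Or.inl hvd)⟩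
          · exact Or.inl ⟨by omega, by omega⟩
      have hpw' : List.Pairwise (fun a b => b < a)
          ((PySem.List.pyRange m t 1).reverse ++ sub) := by
        rw [List.pairwise_append]
        refine ⟨List.pairwise_reverse.mpr ?_, hpw.imp (fun h => h), ?_⟩
        · exact (PySem.List.pairwise_lt_pyRange_one m t).imp (fun h => h)
        · intro a ha b hb
          rw [List.mem_reverse, PySem.List.mem_pyRange_one] at ha
          have := (hmem b).mp hb
          omega
      have hdel' : ∀ v ∈ PySem.Set.add delivered t, 1 ≤ v ∧ v < t + 1 := by
        intro v hv
        rcases (PySem.Set.mem_add _ _ _).mp hv with hv | hv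
        · have := hdel v hv; omega
        · omega
      have htop' : whileTop (PySem.Set.add delivered t) (if m < t then t - 1 else top)
          = (((PySem.List.pyRange m t 1).reverse ++ sub).head?).getD 0 := by
        by_cases hmt : m < t
        · rw [if_pos hmt]
          have hr : PySem.List.pyRange m t 1 = PySem.List.pyRange m (t-1) 1 ++ [t-1] := by
            have := PySem.List.pyRange_one_succ_right (a := m) (b := t - 1) (by omega)
            simpa [show t - 1 + 1 = t by ring] using this
          rw [hr]
          rw [whileTop]
          rw [if_neg (by
            rintro ⟨_, hmem'⟩
            rcases (PySem.Set.mem_add _ _ _).mp hmem' with hvd | hvd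
            · exact absurd (hdel _ hvd).2 (by omega)
            · omega)]
          simp
        · have hm : m = t := by omega
          rw [if_neg hmt, PySem.List.pyRange_one_eq_nil (by omega)]
          simp only [List.reverse_nil, List.nil_append]
          cases sub with
          | nil =>
            rw [htop]
            rw [whileTop]
            simp
          | cons s sub'' =>
            have hs := (hmem s).mp (by simp)
            rw [htop]
            simp only [List.head?_cons, Option.getD_some]
            rw [whileTop]
            rw [if_neg (by
              rintro ⟨_, hmem'⟩
              rcases (PySem.Set.mem_add _ _ _).mp hmem' with hvd | hvd
              · exact hs.2.2 hvd
              · omega)]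
      rw [IH (t+1) (PySem.Set.add delivered t)
        (whileTop (PySem.Set.add delivered t) (if m < t then t - 1 else top))
        ((PySem.List.pyRange m t 1).reverse ++ sub) (answer+1) (ind+1)
        (by omega) hdrop'.symm (by omega) (by omega)
        (by simp [hlenr]; omega) hsub' hpw' htop' hdel']
      simp only [bLoop, if_pos hc1]
    · by_cases hc2 : t = top ∧ top ≠ 0
      · -- stack delivery
        obtain ⟨hteq, htne⟩ := hc2
        cases sub with
        | nil => simp [htop] at htne
        | cons s sub'' =>
          have hs := (hmem s).mp (by simp)
          have hst : s = t := by simp [htop] at hteq; omega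
          subst hst
          have htm : s < m := hs.2.1
          -- A delivers from the stack
          have hAstep : solLoopA order (PySem.List.pyRange m ((order.length : Int) + 1) 1)
              (s :: sub'') answer ind
              = solLoopA order (PySem.List.pyRange m ((order.length : Int) + 1) 1)
                  sub'' (answer+1) (ind+1) := by
            by_cases hm : m ≤ (order.length : Int)
            · rw [PySem.List.pyRange_one_cons (by omega), solLoopA_cons, hget,
                if_neg (by omega)]
              simp
            · rw [PySem.List.pyRange_one_eq_nil (by omega), solLoopA_nil, hget]
              simp
          rw [hAstep]
          have hmem'' : ∀ v : Int, v ∈ sub'' ↔ 1 ≤ v ∧ v < m ∧ v ∉ PySem.Set.add delivered s := by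
            intro v
            constructor
            · intro hv
              have hvlt : v < s := by
                have := List.pairwise_cons.mp hpw
                exact this.1 v hv
              have := (hmem v).mp (by simp [hv])
              exact ⟨this.1, this.2.1, by
                rw [PySem.Set.mem_add]
                rintro (hvd | hvd)
                · exact this.2.2 hvd
                · omega⟩
            · intro ⟨hv1, hv2, hv3⟩
              have hvin : v ∈ s :: sub'' := (hmem v).mpr
                ⟨hv1, hv2, fun hvd => hv3 ((PySem.Set.mem_add _ _ _).mpr (Or.inl hvd))⟩
              rcases List.mem_cons.mp hvin with hv | hv
              · exact absurd ((PySem.Set.mem_add _ _ _).mpr (Or.inr hv)) hv3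
              · exact hv
          have htop'' : whileTop (PySem.Set.add delivered s) top
              = (sub''.head?).getD 0 := by
            have hts : top = s := by simp [htop]
            rw [hts]
            cases sub'' with
            | nil =>
              refine whileTop_eq _ s.toNat s 0 (by omega) (le_refl _) (by omega) ?_ (Or.inl rfl)
              intro v hv1 hv2
              rw [PySem.Set.mem_add]
              by_cases hvs : v = s
              · exact Or.inr hvs
              · left
                by_contra hvd
                exact absurd ((hmem v).mpr ⟨by omega, by omega, hvd⟩) (by simp; omega)
            | cons h' tl' =>
              have hh' := (hmem h').mp (by simp)
              have hh'lt : h' < s := (List.pairwise_cons.mp hpw).1 h' (by simp)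
              refine whileTop_eq _ (s - h').toNat s h' (by omega) (by omega) (by omega) ?_ ?_
              · intro v hv1 hv2
                rw [PySem.Set.mem_add]
                by_cases hvs : v = s
                · exact Or.inr hvs
                · left
                  by_contra hvd
                  have hvin := (hmem v).mpr ⟨by omega, by omega, hvd⟩
                  rcases List.mem_cons.mp hvin with hv | hv
                  · omega
                  · rcases List.mem_cons.mp hv with hv | hv
                    · omega
                    · have := (List.pairwise_cons.mp (List.pairwise_cons.mp hpw).2).1 v hv
                      omega
              · right
                rw [PySem.Set.mem_add]
                rintro (hvd | hvd)
                · exact hh'.2.2 hvd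
                · omega
          rw [IH m (PySem.Set.add delivered s) (whileTop (PySem.Set.add delivered s) top)
            sub'' (answer+1) (ind+1) (by omega) hdrop'.symm h1 h2
            (by simp at hcount ⊢; omega) hmem''
            ((List.pairwise_cons.mp hpw).2) htop''
            (by
              intro v hv
              rcases (PySem.Set.mem_add _ _ _).mp hv with hv | hv
              · exact hdel v hv
              · rw [hv]; exact ⟨hs.1, by omega⟩)]
          have hcond : ¬(s ≠ top ∨ top = 0) := by
            rw [not_or]
            exact ⟨fun h => h hteq, htne⟩
          simp only [bLoop, if_neg hc1, if_neg hcond]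
      · -- stuck: B breaks, A pushes the rest of the conveyor and stops
        have hhd : sub.head? ≠ some t := by
          cases sub with
          | nil => simp
          | cons s sub'' =>
            have hs := (hmem s).mp (by simp)
            simp only [List.head?_cons, ne_eq, Option.some_inj]
            intro hst
            exact hc2 ⟨by simp [htop, hst], by simp [htop]; omega⟩
        have hrange : t < m ∨ (order.length : Int) < t := by
          rcases not_and_or.mp hc1 with h | h
          · left; omega
          · right; omega
        rw [A_stuck order t ind answer hget (((order.length : Int) + 1) - m).toNat m sub
          (le_refl _) hrange hhd]
        have hcond : t ≠ top ∨ top = 0 := by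
          by_cases ht0 : top = 0
          · exact Or.inr ht0
          · exact Or.inl (fun hte => hc2 ⟨hte, ht0⟩)
        simp only [bLoop, if_neg hc1, if_pos hcond]

-- ===== VERDICT (by name: the statement is the Claim_ definition above) =====
theorem solution_spec : Claim_equal_solution := by
  intro order _
  unfold Spec_solution solution solution_alt
  exact loop_eq order order 1 PySem.Set.empty 0 [] 0 0 (le_refl _) (by simp)
    (le_refl _) (by omega) (by simp)
    (by intro v; simp [PySem.Set.empty])
    (by simp) (by simp) (by simp [PySem.Set.empty])
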